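-- pv_equiv track=rewrite | github.com/adityasalapaka/advent-of-code-2020 | day18.py | parenthetic_contents
-- ===== SOURCE A (Python) =====
-- def parenthetic_contents(string:str):
-- 	"""Generate parenthesized contents in string as pairs (level, contents)."""
-- 	stack = []
-- 	for i, c in enumerate(string):
-- 		if c == '(':
-- 			stack.append(i)
-- 		elif c == ')' and stack:
-- 			start = stack.pop()
-- 			yield (string[start + 1: i])
-- 			break
-- ===== SOURCE B (Python) =====
-- def parenthetic_contents(string: str):
--     """Generate parenthesized contents in string as pairs (level, contents)."""
--     p = string.find('(')
--     if p != -1: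
--         j = string.find(')', p)
--         if j != -1:
--             start = string.rindex('(', 0, j)
--             yield string[start + 1:j]
-- ===== Notes on version B (the rewrite author's own statement) =====
-- stated objective: simpler
-- what changed: Replaces the per-character loop with an index stack by three substring searches (first open paren, first close paren after it, last open paren before that close), exploiting that the popped stack value is always the last open paren before the first qualifying close paren.
import Mathlib
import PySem

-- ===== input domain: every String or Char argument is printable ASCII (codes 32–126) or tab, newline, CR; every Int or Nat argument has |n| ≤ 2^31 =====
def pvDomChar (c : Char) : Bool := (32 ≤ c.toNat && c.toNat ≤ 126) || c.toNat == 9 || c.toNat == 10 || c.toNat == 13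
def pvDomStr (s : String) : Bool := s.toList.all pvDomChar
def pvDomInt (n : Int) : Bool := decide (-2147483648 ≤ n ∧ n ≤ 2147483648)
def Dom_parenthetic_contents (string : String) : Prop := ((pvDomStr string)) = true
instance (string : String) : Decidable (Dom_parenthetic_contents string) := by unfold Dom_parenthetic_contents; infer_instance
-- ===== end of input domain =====

-- B replaces A's per-character loop with an index stack by three substring searches
-- (first '(', first ')' after it, last '(' before that ')'); objective: simpler.


-- ===== PORT A =====
-- for i, c in enumerate(string): the loop becomes structural recursion over the
-- character list carrying the running index i and the stack of '(' indices;
-- 'yield …; break' returns a singleton, falling off the loop returns [].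
-- string[start+1:i] (0 ≤ start+1 ≤ i here) is (drop (start+1)).take (i-(start+1)).
def pcGoA (s : List Char) : List Char → Nat → List Nat → List String
  | [], _, _ => []
  | c :: rest, i, stack =>
    if c = '(' then pcGoA s rest (i + 1) (i :: stack)
    else if c = ')' ∧ stack ≠ [] then
      let start := stack.headD 0
      [String.mk ((s.drop (start + 1)).take (i - (start + 1)))]
    else pcGoA s rest (i + 1) stack

def parenthetic_contents (string : String) : List String :=
  pcGoA string.toList string.toList 0 []

-- ===== PORT B =====
-- string.find('(') / string.find(')', p) / string.rindex('(', 0, j) on a single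
-- character are ported exactly as List.findIdx? on the character list (resp. on
-- its drop p suffix, resp. on the reversed take j prefix); the rindex in Source B can
-- never raise (cs[p] = '(' with p < j), so the 'none' arm is unreachable.
def parenthetic_contents_alt (string : String) : List String :=
  let cs := string.toList
  match cs.findIdx? (· = '(') with
  | none => []
  | some p =>
    match (cs.drop p).findIdx? (· = ')') with
    | none => []
    | some r =>
      let j := p + r
      match (cs.take j).reverse.findIdx? (· = '(') with
      | none => []   -- unreachable
      | some q =>
        let start := j - 1 - q
        [String.mk ((cs.drop (start + 1)).take (j - (start + 1)))]

-- ===== PRECONDITION & SPEC =====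
def Spec_parenthetic_contents (string : String) (out : List String) : Prop := out = parenthetic_contents_alt string
instance (string : String) (out : List String) : Decidable (Spec_parenthetic_contents string out) := by unfold Spec_parenthetic_contents; infer_instance

-- ===== CLAIM (what is proved, stated in full; the proofs are below) =====
def Claim_equal_parenthetic_contents : Prop := ∀ (string : String), Dom_parenthetic_contents string → Spec_parenthetic_contents string (parenthetic_contents string)

-- ===== LEMMAS AND PROOFS =====

-- [slice from (last '(' before j)+1 to j], if any '(' occurs before j
def pvYieldAt (s : List Char) (j : Nat) : List String :=
  match (s.take j).reverse.findIdx? (· = '(') with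
  | none => []
  | some q =>
    let start := j - 1 - q
    [String.mk ((s.drop (start + 1)).take (j - (start + 1)))]

-- B's computation restarted at position i, knowing whether a '(' was already seen
def pvF (s : List Char) (i : Nat) (opened : Bool) : List String :=
  if opened then
    match (s.drop i).findIdx? (· = ')') with
    | none => []
    | some r => pvYieldAt s (i + r)
  else
    match (s.drop i).findIdx? (· = '(') with
    | none => []
    | some r =>
      match (s.drop (i + r)).findIdx? (· = ')') with
      | none => []
      | some r2 => pvYieldAt s (i + r + r2)

theorem pv_alt_eq_F (string : String) :
    parenthetic_contents_alt string = pvF string.toList 0 false := by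
  unfold parenthetic_contents_alt pvF pvYieldAt
  simp only [List.drop_zero, Bool.false_eq_true, if_false, Nat.zero_add]

theorem pv_rev_findIdx (l : List Char) (x : Nat) (hx : x < l.length) (hp : l[x] = '(')
    (hlast : ∀ k, x < k → (hk : k < l.length) → l[k] ≠ '(') :
    l.reverse.findIdx? (· = '(') = some (l.length - 1 - x) := by
  rw [List.findIdx?_eq_some_iff_getElem]
  refine ⟨by simp; omega, ?_, ?_⟩
  · rw [List.getElem_reverse]
    simp only [decide_eq_true_eq]
    convert hp using 2
    omega
  · intro j hj
    rw [List.getElem_reverse]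
    simp only [decide_eq_true_eq]
    exact hlast (l.length - 1 - j) (by omega) (by omega)

theorem pcGoA_eq_F (s : List Char) : ∀ (cs : List Char) (i : Nat) (st : List Nat),
    s.drop i = cs →
    (st = [] → ∀ k (hk : k < s.length), k < i → s[k] ≠ '(') →
    (∀ x xs, st = x :: xs → x < i ∧ ∃ (hx : x < s.length), s[x] = '(' ∧
        ∀ k (hk : k < s.length), x < k → k < i → s[k] ≠ '(') →
    pcGoA s cs i st = pvF s i (!st.isEmpty) := by
  intro cs
  induction cs with
  | nil =>
    intro i st hdrop _ _
    have hlen : s.length ≤ i := List.drop_eq_nil_iff.mp hdrop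
    cases st <;> simp [pcGoA, pvF, hdrop]
  | cons c rest ih =>
    intro i st hdrop hnil hcons
    have hi : i < s.length := by
      by_contra h
      have : s.drop i = [] := by rw [List.drop_eq_nil_iff]; omega
      simp [this] at hdrop
    have hci : s[i] = c := by
      have h0 : (s.drop i)[0]'(by simp [hdrop]) = c := by simp [hdrop]
      simpa [List.getElem_drop] using h0
    have hrest : s.drop (i + 1) = rest := by
      rw [← List.tail_drop, hdrop, List.tail_cons]
    by_cases hc : c = '('
    · -- push
      have ih' := ih (i + 1) (i :: st) hrest (by simp)
        (by
          intro x xs hx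
          cases hx
          exact ⟨by omega, hi, by rw [hci]; exact hc, by intro k hk h1 h2; omega⟩)
      rw [pcGoA, if_pos hc, ih']
      subst hc
      cases st with
      | cons x xs =>
        simp only [List.isEmpty_cons, Bool.not_false, pvF, if_true, hdrop, hrest,
          List.findIdx?_cons]
        norm_num
        cases h : rest.findIdx? (· = ')') with
        | none => simp
        | some r => simp [Nat.add_assoc, Nat.add_comm 1 r]
      | nil =>
        simp only [List.isEmpty_nil, List.isEmpty_cons, Bool.not_true, Bool.not_false,
          pvF, if_true, Bool.false_eq_true, if_false, hrest, hdrop, List.findIdx?_cons]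
        norm_num
        rw [hdrop, List.findIdx?_cons]
        norm_num
        cases h : rest.findIdx? (· = ')') with
        | none => simp
        | some r2 => simp [Nat.add_assoc, Nat.add_comm 1 r2]
    · by_cases hpop : c = ')' ∧ st ≠ []
      · -- yield and break
        obtain ⟨hc', hne⟩ := hpop
        cases st with
        | nil => exact absurd rfl hne
        | cons x xs =>
          obtain ⟨hxi, hxlen, hxp, hxlast⟩ := hcons x xs rfl
          rw [pcGoA, if_neg hc, if_pos ⟨hc', hne⟩]
          subst hc'
          simp only [List.headD_cons, List.isEmpty_cons, Bool.not_false, pvF, if_pos,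
            hdrop, List.findIdx?_cons]
          norm_num
          unfold pvYieldAt
          have hrev := pv_rev_findIdx (s.take i) x (by simp; omega)
            (by rw [List.getElem_take]; exact hxp)
            (by
              intro k hk hklen
              rw [List.getElem_take]
              exact hxlast k (by simp at hklen; omega) hk (by simp at hklen; omega))
          rw [hrev]
          have hlen : (s.take i).length = i := by simp; omega
          have hxx : i - 1 - (i - 1 - x) = x := by omega
          simp [hlen, hxx]
      · -- skip
        have ih' := ih (i + 1) st hrest
          (by
            intro hst k hk h1
            rcases Nat.lt_or_ge k i with h | h
            · exact hnil hst k hk h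
            · have : k = i := by omega
              subst this; rw [hci]; exact hc)
          (by
            intro x xs hst
            obtain ⟨hxi, hxlen, hxp, hxlast⟩ := hcons x xs hst
            refine ⟨by omega, hxlen, hxp, ?_⟩
            intro k hk h1 h2
            rcases Nat.lt_or_ge k i with h | h
            · exact hxlast k hk h1 h
            · have : k = i := by omega
              subst this; rw [hci]; exact hc)
        rw [pcGoA, if_neg hc, if_neg hpop, ih']
        cases st with
        | cons x xs =>
          have hc'' : ¬ (c = ')') := fun h => hpop ⟨h, by simp⟩
          simp only [List.isEmpty_cons, Bool.not_false, pvF, if_pos, hdrop, hrest,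
            List.findIdx?_cons, decide_eq_true_eq, hc'', if_false]
          cases h : rest.findIdx? (· = ')') with
          | none => simp
          | some r => simp [Nat.add_assoc, Nat.add_comm 1 r]
        | nil =>
          simp only [List.isEmpty_nil, Bool.not_true, pvF, Bool.false_eq_true, if_false,
            hdrop, hrest, List.findIdx?_cons, decide_eq_true_eq, hc, if_false]
          cases h : rest.findIdx? (· = '(') with
          | none => simp
          | some r =>
            simp only [Option.map_some, Nat.add_comm 1 r]
            have harr : i + (r + 1) = i + 1 + r := by omega
            rw [harr]

-- ===== VERDICT (by name: the statement is the Claim_ definition above) =====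
theorem parenthetic_contents_spec : Claim_equal_parenthetic_contents := by
  intro string _
  unfold Spec_parenthetic_contents parenthetic_contents
  rw [pv_alt_eq_F]
  exact pcGoA_eq_F string.toList string.toList 0 [] (by simp)
    (by intro _ k _ h; omega) (by intro x xs h; cases h)
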